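-- pv_equiv track=rewrite | github.com/kkovacik/My-Code | Python/basic python/mergestring.py | mergestring
-- ===== SOURCE A (Python) =====
-- def mergestring(s1, s2):
--     seq=[]
--     for i in range(0, len(s1)+len(s2)):
--         if i < len(s1):
--             seq.append(s1[i])
--         if i < len(s2):
--             seq.append(s2[i])
--     newstring=''.join(seq)
--     return newstring
-- ===== SOURCE B (Python) =====
-- def mergestring(s1, s2):
--     n = min(len(s1), len(s2))
--     head = ''.join(a + b for a, b in zip(s1, s2))
--     return head + s1[n:] + s2[n:]
-- ===== Notes on version B (the rewrite author's own statement) =====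
-- stated objective: simpler
-- what changed: Replaced the per-index loop over range(len(s1)+len(s2)) with two if-guarded char appends by a single zip over the shared prefix joined in one pass plus slice concatenation of the two leftover tails.
import Mathlib
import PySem

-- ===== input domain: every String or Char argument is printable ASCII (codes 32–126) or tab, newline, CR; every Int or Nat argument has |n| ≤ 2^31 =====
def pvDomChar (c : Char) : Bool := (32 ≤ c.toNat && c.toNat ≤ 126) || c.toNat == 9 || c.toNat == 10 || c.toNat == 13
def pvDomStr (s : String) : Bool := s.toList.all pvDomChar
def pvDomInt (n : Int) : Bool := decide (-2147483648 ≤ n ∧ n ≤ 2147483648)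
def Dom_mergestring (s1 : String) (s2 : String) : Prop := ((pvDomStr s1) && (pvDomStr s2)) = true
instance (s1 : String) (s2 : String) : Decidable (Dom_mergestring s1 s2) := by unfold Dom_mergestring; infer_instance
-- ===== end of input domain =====

-- B replaces A's if-guarded index loop with a zip over the common prefix plus slice tails (objective: simpler).

-- ===== PORT A =====
-- for i in range(0, len(s1)+len(s2)): if i < len(s1): seq.append(s1[i]); if i < len(s2): seq.append(s2[i])
def mergestring (s1 : String) (s2 : String) : String :=
  let l1 := s1.toList
  let l2 := s2.toList
  let seq := (PySem.List.pyRange 0 ((l1.length : Int) + (l2.length : Int)) 1).foldl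
    (fun acc i =>
      let acc := if i < (l1.length : Int) then acc ++ (PySem.List.pyGet? l1 i).toList else acc
      if i < (l2.length : Int) then acc ++ (PySem.List.pyGet? l2 i).toList else acc)
    []
  String.mk seq

-- ===== PORT B =====
-- n = min(len(s1), len(s2)); head = ''.join(a+b for a,b in zip(s1,s2)); head + s1[n:] + s2[n:]
def mergestring_alt (s1 : String) (s2 : String) : String :=
  let l1 := s1.toList
  let l2 := s2.toList
  let n := min l1.length l2.length
  let head := (l1.zip l2).flatMap (fun p => [p.1, p.2])
  String.mk (head ++ l1.drop n ++ l2.drop n)   -- s[n:] with 0 ≤ n is List.drop n (PySem.List.slice_from_natCast)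

-- ===== PRECONDITION & SPEC =====
def Spec_mergestring (s1 : String) (s2 : String) (out : String) : Prop := out = mergestring_alt s1 s2
instance (s1 : String) (s2 : String) (out : String) : Decidable (Spec_mergestring s1 s2 out) := by unfold Spec_mergestring; infer_instance

-- ===== CLAIM (what is proved, stated in full; the proofs are below) =====
def Claim_equal_mergestring : Prop := ∀ (s1 : String) (s2 : String), Dom_mergestring s1 s2 → Spec_mergestring s1 s2 (mergestring s1 s2)

-- ===== LEMMAS AND PROOFS =====

-- the per-iteration contribution of A's loop body at index i
def pvBody (l1 l2 : List Char) (i : Int) : List Char :=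
  (if i < (l1.length : Int) then (PySem.List.pyGet? l1 i).toList else []) ++
  (if i < (l2.length : Int) then (PySem.List.pyGet? l2 i).toList else [])

theorem pvBody_shift (l1 l2 : List Char) (i : Int) (h : 0 ≤ i) :
    pvBody l1 l2 (i + 1) = pvBody l1.tail l2.tail i := by
  obtain ⟨k, rfl⟩ : ∃ k : Nat, i = (k : Int) := ⟨i.toNat, (Int.toNat_of_nonneg h).symm⟩
  cases l1 <;> cases l2 <;>
    simp [pvBody, PySem.List.pyGet?_cons_succ, PySem.List.pyGet?_natCast] <;>
    (intro h1; exact absurd h1 (by omega))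

theorem pvShiftRange (K : Int) :
    PySem.List.pyRange 1 K 1 = (PySem.List.pyRange 0 (K - 1) 1).map (· + 1) := by
  rw [PySem.List.pyRange_one, PySem.List.pyRange_one, List.map_map]
  have h : K - 1 - 0 = K - 1 := by ring
  rw [h]
  apply List.map_congr_left
  intro k _
  simp; omega

theorem pvFlatMap_congr_mem {α β : Type} (l : List α) (f g : α → List β)
    (h : ∀ a ∈ l, f a = g a) : l.flatMap f = l.flatMap g := by
  simp only [List.flatMap]
  rw [List.map_congr_left h]

theorem pvPeel (l1 l2 : List Char) (K : Int) (hK : 0 < K) :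
    (PySem.List.pyRange 0 K 1).flatMap (pvBody l1 l2) =
      pvBody l1 l2 0 ++ (PySem.List.pyRange 0 (K - 1) 1).flatMap (pvBody l1.tail l2.tail) := by
  rw [PySem.List.pyRange_one_cons hK, List.flatMap_cons]
  have h01 : (0 : Int) + 1 = 1 := by norm_num
  rw [h01, pvShiftRange, List.flatMap_map]
  congr 1
  exact pvFlatMap_congr_mem _ _ _
    (fun i hi => pvBody_shift _ _ i (PySem.List.mem_pyRange_one.mp hi).1)

theorem pvMainAux (n : Nat) : ∀ (l1 l2 : List Char) (K : Int),
    l1.length + l2.length = n → (n : Int) ≤ K →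
    (PySem.List.pyRange 0 K 1).flatMap (pvBody l1 l2) =
      (l1.zip l2).flatMap (fun p => [p.1, p.2]) ++
        l1.drop (min l1.length l2.length) ++ l2.drop (min l1.length l2.length) := by
  induction n using Nat.strong_induction_on with
  | _ n IH =>
    intro l1 l2 K hlen hK
    cases l1 with
    | nil =>
      cases l2 with
      | nil =>
        rw [pvFlatMap_congr_mem _ _ (fun _ => []) ?_]
        · simp
        · intro i hi
          have h0 : 0 ≤ i := (PySem.List.mem_pyRange_one.mp hi).1
          simp [pvBody]
          omega
      | cons b t2 =>
        rw [pvPeel _ _ _ (by simp at hlen; omega)]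
        simp only [List.tail_cons, List.tail_nil]
        rw [IH t2.length (by simp at hlen ⊢; omega) [] t2 (K - 1) (by simp) (by simp at hlen; omega)]
        simp [pvBody]
    | cons a t1 =>
      cases l2 with
      | nil =>
        rw [pvPeel _ _ _ (by simp at hlen; omega)]
        simp only [List.tail_cons, List.tail_nil]
        rw [IH t1.length (by simp at hlen ⊢; omega) t1 [] (K - 1) (by simp) (by simp at hlen; omega)]
        simp [pvBody]
      | cons b t2 =>
        rw [pvPeel _ _ _ (by simp at hlen; omega)]
        simp only [List.tail_cons]
        rw [IH (t1.length + t2.length) (by simp at hlen ⊢; omega) t1 t2 (K - 1) rfl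
          (by simp at hlen; push_cast; omega)]
        simp [pvBody, Nat.succ_min_succ]

theorem pvMerge_eq (s1 s2 : String) : mergestring s1 s2 = mergestring_alt s1 s2 := by
  simp only [mergestring, mergestring_alt]
  congr 1
  have hf : (fun (acc : List Char) (i : Int) =>
      let acc := if i < (s1.toList.length : Int) then acc ++ (PySem.List.pyGet? s1.toList i).toList else acc
      if i < (s2.toList.length : Int) then acc ++ (PySem.List.pyGet? s2.toList i).toList else acc)
      = fun acc i => acc ++ pvBody s1.toList s2.toList i := by
    funext acc i
    simp only [pvBody]
    split_ifs <;> simp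
  rw [hf, PySem.List.foldl_append_eq_flatMap]
  rw [pvMainAux (s1.toList.length + s2.toList.length) _ _ _ rfl (by push_cast; omega)]
  simp

-- ===== VERDICT (by name: the statement is the Claim_ definition above) =====
theorem mergestring_spec : Claim_equal_mergestring := fun s1 s2 _ => pvMerge_eq s1 s2
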